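-- pv_equiv track=rewrite | github.com/Oldwolfster/neural_network_arena | src/Reporting.py | determine_problem_type
-- ===== SOURCE A (Python) =====
-- def determine_problem_type(data):
--     # Extract unique values from the second element of each tuple
--     unique_values = set(item[1] for item in data)
--
--     # If there are only two unique values, it's likely a binary decision problem
--     if len(unique_values) == 2:
--         return "Binary Decision"
--
--     # If there are more than two unique values, it's likely a regression problem
--     elif len(unique_values) > 2:
--         return "Regression"
--
--     # If there's only one unique value or the list is empty, it's inconclusive
--     else:
--         return "Inconclusive"
-- ===== SOURCE B (Python) =====
-- def determine_problem_type(data):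
--     it = iter(data)
--     # stage 1: find any label at all
--     for item in it:
--         a = item[1]
--         break
--     else:
--         return "Inconclusive"
--     # stage 2: find a label different from a
--     for item in it:
--         if item[1] != a:
--             b = item[1]
--             break
--     else:
--         return "Inconclusive"
--     # stage 3: find a label different from both
--     for item in it:
--         if item[1] != a and item[1] != b:
--             return "Regression"
--     return "Binary Decision"
-- ===== Notes on version B (the rewrite author's own statement) =====
-- stated objective: alternative
-- what changed: Replaces building a set of distinct labels and measuring its size by three staged short-circuit searches over one shared iterator (first label, first different label, any third distinct label); the stage at which the search stops determines the answer, with no set and no counting.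
import Mathlib
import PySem

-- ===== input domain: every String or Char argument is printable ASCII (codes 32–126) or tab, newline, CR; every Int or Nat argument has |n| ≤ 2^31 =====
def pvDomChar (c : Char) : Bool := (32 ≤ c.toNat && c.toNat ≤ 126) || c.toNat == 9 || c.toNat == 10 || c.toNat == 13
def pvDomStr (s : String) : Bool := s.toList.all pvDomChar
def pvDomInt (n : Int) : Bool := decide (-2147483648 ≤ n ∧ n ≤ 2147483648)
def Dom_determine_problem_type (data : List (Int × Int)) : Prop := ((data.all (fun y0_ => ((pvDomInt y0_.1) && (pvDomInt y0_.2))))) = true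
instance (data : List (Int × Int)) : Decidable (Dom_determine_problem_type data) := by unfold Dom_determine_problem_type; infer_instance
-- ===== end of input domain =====

-- B replaces "build the set of distinct labels, then measure it" by three staged
-- short-circuit searches over the remaining list (first label, first different label,
-- any third distinct label); no set and no counting (objective: alternative).

-- ===== PORT A =====
def determine_problem_type (data : List (Int × Int)) : String :=
  let unique_values : PySem.Set Int := PySem.Set.ofList (data.map (fun item => item.2))
  if unique_values.length = 2 then "Binary Decision"
  else if unique_values.length > 2 then "Regression"
  else "Inconclusive"

-- ===== PORT B =====
-- stage 3: any label different from both a and b?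
def dptAltStage3 (a b : Int) : List (Int × Int) → String
  | [] => "Binary Decision"
  | item :: rest =>
    if item.2 ≠ a ∧ item.2 ≠ b then "Regression" else dptAltStage3 a b rest

-- stage 2: first label different from a
def dptAltStage2 (a : Int) : List (Int × Int) → String
  | [] => "Inconclusive"
  | item :: rest =>
    if item.2 ≠ a then dptAltStage3 a item.2 rest else dptAltStage2 a rest

-- stage 1: any label at all
def determine_problem_type_alt : List (Int × Int) → String
  | [] => "Inconclusive"
  | item :: rest => dptAltStage2 item.2 rest

-- ===== PRECONDITION & SPEC =====
def Spec_determine_problem_type (data : List (Int × Int)) (out : String) : Prop := out = determine_problem_type_alt data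
instance (data : List (Int × Int)) (out : String) : Decidable (Spec_determine_problem_type data out) := by unfold Spec_determine_problem_type; infer_instance

-- ===== CLAIM =====
def Claim_equal_determine_problem_type : Prop := ∀ (data : List (Int × Int)), Dom_determine_problem_type data → Spec_determine_problem_type data (determine_problem_type data)

-- ===== LEMMAS AND PROOFS =====

theorem pv_length_le_add (s : PySem.Set Int) (x : Int) : s.length ≤ (PySem.Set.add s x).length := by
  simp only [PySem.Set.add]
  split <;> simp

theorem pv_length_le_foldl (vs : List Int) (s : PySem.Set Int) :
    s.length ≤ (vs.foldl PySem.Set.add s).length := by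
  induction vs generalizing s with
  | nil => simp
  | cons v vs ih => exact le_trans (pv_length_le_add s v) (ih _)

theorem pv_stage3_eq (a b : Int) (rest : List (Int × Int)) :
    dptAltStage3 a b rest =
      (if ((rest.map (fun item => item.2)).foldl PySem.Set.add [a, b]).length = 2 then "Binary Decision"
       else if ((rest.map (fun item => item.2)).foldl PySem.Set.add [a, b]).length > 2 then "Regression"
       else "Inconclusive") := by
  induction rest with
  | nil => simp [dptAltStage3]
  | cons item rest ih =>
    simp only [dptAltStage3, List.map_cons, List.foldl_cons]
    by_cases hv : item.2 ≠ a ∧ item.2 ≠ b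
    · have hadd : PySem.Set.add [a, b] item.2 = [a, b, item.2] := by
        simp [PySem.Set.add, PySem.Set.contains, hv.1, hv.2]
      have hle := pv_length_le_foldl (rest.map (fun item => item.2)) ([a, b, item.2] : List Int)
      simp only [List.length_cons, List.length_nil] at hle
      have h2 : ¬ ((rest.map (fun item => item.2)).foldl PySem.Set.add [a, b, item.2]).length = 2 := by omega
      have hgt : ((rest.map (fun item => item.2)).foldl PySem.Set.add [a, b, item.2]).length > 2 := by omega
      rw [if_pos hv]; simp only [hadd]
      simp [h2, hgt]
    · have hmem : item.2 = a ∨ item.2 = b := by tauto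
      have hadd : PySem.Set.add [a, b] item.2 = [a, b] := by
        rcases hmem with h | h <;> simp [PySem.Set.add, PySem.Set.contains, h]
      rw [if_neg hv]; simp only [hadd]
      exact ih

theorem pv_stage2_eq (a : Int) (rest : List (Int × Int)) :
    dptAltStage2 a rest =
      (if ((rest.map (fun item => item.2)).foldl PySem.Set.add [a]).length = 2 then "Binary Decision"
       else if ((rest.map (fun item => item.2)).foldl PySem.Set.add [a]).length > 2 then "Regression"
       else "Inconclusive") := by
  induction rest with
  | nil => simp [dptAltStage2]
  | cons item rest ih =>
    simp only [dptAltStage2, List.map_cons, List.foldl_cons]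
    by_cases hv : item.2 ≠ a
    · have hadd : PySem.Set.add [a] item.2 = [a, item.2] := by
        simp [PySem.Set.add, PySem.Set.contains, hv]
      rw [if_pos hv]; simp only [hadd]
      exact pv_stage3_eq a item.2 rest
    · have h : item.2 = a := by tauto
      have hadd : PySem.Set.add [a] item.2 = [a] := by
        simp [PySem.Set.add, PySem.Set.contains, h]
      rw [if_neg hv]; simp only [hadd]
      exact ih

-- ===== VERDICT =====
theorem determine_problem_type_spec : Claim_equal_determine_problem_type := by
  intro data _
  unfold Spec_determine_problem_type determine_problem_type
  rw [PySem.Set.ofList_eq_foldl]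
  cases data with
  | nil => simp [determine_problem_type_alt]
  | cons item rest =>
    simp only [determine_problem_type_alt, List.map_cons, List.foldl_cons]
    have hadd : PySem.Set.add [] item.2 = [item.2] := by
      simp [PySem.Set.add, PySem.Set.contains]
    simp only [hadd]
    rw [pv_stage2_eq item.2 rest]
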